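/- GENERATED by mk_final_copies.py from the proof of the farm's unit `start_decoder.F2d` (farm:start_decoder.F2d.1: Proof.lean) as the
   re-elaboration sweep compiled it — do not edit. -/
import Asan.CheckWalk
import Vorbis.Spec.Units.start_decoder_F2d
import Vorbis.Spec.StartDecoderFloor

open X86 X86.User Asan Vorbis Vorbis.Spec Vorbis.Spec.StartDecoder

set_option maxRecDepth 100000
set_option maxHeartbeats 4000000

namespace Vorbis.Spec.start_decoder_F2d

/-- A small counter held zero-extended in a 32-bit register, as a signed number. -/
theorem f2d_part32_toInt (k : Nat) (hk : k < 2 ^ 31) : (Word.part .w32 (UInt64.ofNat k)).toInt = (k : Int) := by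
  rw [Vorbis.Spec.part32_toInt, Code.toNat_ofNat_lt _ (by omega)]
  have c1 := sint32_cases (k % 2 ^ 32)
  omega

/-- A byte loaded by `movzx` into a 32-bit register, as a signed number. -/
theorem f2d_zext8_toInt (P : Nat) (hP : P < 256) : (BitVec.zeroExtend 32 (BitVec.ofNat 8 P)).toInt = (P : Int) := by
  rw [BitVec.toInt_eq_toNat_cond]
  simp only [BitVec.toNat_setWidth, BitVec.toNat_ofNat]
  omega

/-- `movsxd r14, r12d` of a small counter held zero-extended. -/
theorem f2d_sext_ofNat (j : Nat) (hj : j < 2 ^ 31) :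
    (Word.ofBV (BitVec.signExtend 64 (Word.part .w32 (UInt64.ofNat j)))).toNat = j := by
  rw [toNat_sext32]
  · rw [Vorbis.toNat_part32, Code.toNat_ofNat_lt _ (by omega)]
    exact Nat.mod_eq_of_lt (by omega)
  · rw [Vorbis.toNat_part32, Code.toNat_ofNat_lt _ (by omega), Nat.mod_eq_of_lt (by omega)]
    exact hj

/-- `add r12d, 1` on a small counter held zero-extended. -/
theorem f2d_inc32_ofNat (j : Nat) (hj : j + 1 < 2 ^ 32) :
    Word.ofBV (Word.part Width.w32 (UInt64.ofNat j) + 1#32) = UInt64.ofNat (j + 1) := by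
  have e : (Word.ofBV (Word.part Width.w32 (UInt64.ofNat j) + 1#32)).toNat = j + 1 := by
    rw [Vorbis.toNat_ofBV32, BitVec.toNat_add, Vorbis.toNat_part32, Code.toNat_ofNat_lt _ (by omega)]
    have e1 : (1#32).toNat = 1 := by decide
    rw [e1]
    omega
  exact eq_addr _ _ e

/-- The four bits in `r15b`, as the byte that is stored. -/
theorem f2d_byte (z : Nat) (hz : z < 16) : (BitVec.setWidth 8 (Word.part .w32 (UInt64.ofNat z))).toNat = z := by
  rw [BitVec.toNat_setWidth, Vorbis.toNat_part32, Code.toNat_ofNat_lt _ (by omega)]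
  omega

/-- `movzx r15d, r15b` of the four bits, as a signed number. -/
theorem f2d_z_toInt (z : Nat) (hz : z < 16) :
    (BitVec.zeroExtend 32 (BitVec.setWidth 8 (Word.part .w32 (UInt64.ofNat z)))).toInt = (z : Int) := by
  rw [BitVec.toInt_eq_toNat_cond]
  simp only [BitVec.toNat_setWidth, Vorbis.toNat_part32]
  rw [Code.toNat_ofNat_lt _ (by omega)]
  omega

/-- `mov r13d, r15d` of the four bits: the new `max_class`, in the form of the assertion. -/
theorem f2d_z_word (z : Nat) (hz : z < 16) :
    Word.ofBV (BitVec.zeroExtend 32 (BitVec.setWidth 8 (Word.part .w32 (UInt64.ofNat z)))) = word32 (z : Int) := by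
  rw [word32_nonneg _ (by omega) (by omega)]
  apply eq_addr
  rw [Vorbis.toNat_ofBV32]
  simp only [BitVec.toNat_setWidth, Vorbis.toNat_part32]
  rw [Code.toNat_ofNat_lt _ (by omega)]
  omega

/-- `mov r15d, r13d ; mov r13d, r15d` of the old `max_class`: unchanged (it is held zero-extended). -/
theorem f2d_word32_idem (m : Int) : Word.ofBV (Word.part .w32 (word32 m)) = word32 m := by
  have e : word32 m = addr (m % 4294967296).toNat := rfl
  rw [e]
  apply eq_addr
  rw [Vorbis.toNat_ofBV32, Vorbis.toNat_part32, toNat_addr _ (by omega)]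
  omega

/-- **The return of `get_bits(f, 4)` inside the round, 0x115471 (`cut205`)** (private to this unit): the clauses of `InF2L` at this
address with `j < partitions` (the loop test) and rax = the four bits. -/
structure MidF2d (u₀ : State) (g : Ghost) (i : Nat) (A5 : Arena) (A : Arena × List Obj) (j : Nat) (mc : Int) (v : State) :
    Prop where
  loop : FloorLoop u₀ g L.start_decoder.cut205 i A5 A v
  lt : (i : Int) < stb_vorbis.floor_count v.mem g.f
  FL3 : stb_vorbis.floor_types v.mem g.f i = 1
  rbx : v.reg .rbx = addr (floorAt g v.mem i)
  r12 : v.reg .r12 = addr j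
  r13 : v.reg .r13 = word32 mc
  FL4 : Floor1.partitions v.mem (floorAt g v.mem i) ≤ 31
  j_lt : j < Floor1.partitions v.mem (floorAt g v.mem i)
  mc_lo : -1 ≤ mc
  mc_hi : mc ≤ 15
  pcl : PclUpTo v.mem (floorAt g v.mem i) j mc
  rax : (v.reg .rax).toNat < 16

/-- **The first half of the round** (0x11545c … 0x11546c and the callee): the loop test — `partitions ≤ j`: the exit to F4 — else
`get_bits(f, 4)` up to its return. -/
theorem f2d_head (Lay : Layout) (hLay : Lay.hi = 0x1000000) (μ : Microarch) (hμ : UserX.MicroOK μ) (u₀ : State)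
    (hcode : HasCodeNat Lay u₀ Vorbis.L.start_decoder.entry Vorbis.Code.code_start_decoder.nat Vorbis.L.start_decoder.size)
    (h_gb : ∀ (others : List Obj) (frames : List (Nat × FrameLayout)) (Blk : Block → Prop) (len : Nat),
      Calls Lay μ Vorbis.WayInv (Vorbis.conv u₀) Vorbis.L.get_bits.entry (Vorbis.Spec.get_bits.spec others frames Blk len))
    (g : Ghost) (i : Nat) (A5 : Arena) (A : Arena × List Obj) (j : Nat) (mc : Int) (v : State)
    (h : InF2L u₀ g i A5 A j mc v) :
    ReachVia Lay μ WayInv v (fun w => MidF2d u₀ g i A5 A j mc w ∨ AtF4 u₀ g i w) := by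
  have hgb := h_gb A.2 g.frames' (g.Blk A) g.len
  have hlt : (i : Int) < stb_vorbis.floor_count v.mem g.f := h.lt
  have hgeo := Floor.geo h.loop hlt
  have hgeo0 := hgeo
  obtain ⟨r8, rlo, rhi, ra, flo, fhi, fstack, farena, flog, fc1, fc64, ilt, gdef, blo, bhi, btext, bstack, bdata, blog⟩ := hgeo
  have hfr := h.loop.frame
  have hspn : (v.reg .rsp).toNat = g.R := by
    rw [hfr.rsp]
    exact toNat_addr _ (by omega)
  have hfn : (v.reg .rbp).toNat = g.f := by
    rw [h.loop.rbp]
    exact toNat_addr _ (by omega)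
  obtain ⟨G, hG⟩ : ∃ G : Nat, G = floorAt g v.mem i := ⟨_, rfl⟩
  rw [← hG] at gdef
  have hgwn : (v.reg .rbx).toNat = G := by
    rw [h.rbx, ← hG]
    exact toNat_addr _ (by omega)
  have hr12 : v.reg .r12 = UInt64.ofNat j := h.r12
  have hFL4 := h.FL4
  have hjle := h.j_le
  rw [← hG] at hFL4 hjle
  obtain ⟨P, hP⟩ : ∃ P : Nat, P = Floor1.partitions v.mem G := ⟨_, rfl⟩
  rw [← hP] at hFL4 hjle
  have rP : v.mem.readLE (v.reg .rbx) 1 = P := by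
    rw [hP, h.rbx, ← hG]
    simp only [vacc, voff, Nat.add_zero]
    rfl
  have w_rip := hfr.rip
  have w_eq : Mem.EqOn Vorbis.L.textLo Vorbis.L.textHi u₀.mem v.mem := hfr.code
  have hdf : v.flags .df = false := (show abiInv _ from hfr.inv).1
  have hmx : v.mxcsr &&& 0x1F80 = 0x1F80 := (show abiInv _ from hfr.inv).2
  have hsse := Vorbis.sseOK_of_abiInv hfr.inv
  u_walk hcode [hμ.vendor] until [Vorbis.L.start_decoder.cut205, Vorbis.L.start_decoder.cut206] span [Vorbis.L.textLo, Vorbis.L.textHi] side (v_side)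
  case call_inv =>
    v_inv
  case pre_11546c =>
    -- `ReaderPre` of `get_bits(f, 4)`
    have hun : ShadowUntouched v.mem s_11546c.mem := by v_untouched
    have hrdi : (s_11546c.reg .rdi).toNat = g.f := by
      rw [w_rdi]
      exact hfn
    refine ⟨Floor.reader_pre h.loop ?_ hun hrdi ?_, ?_⟩
    · rw [w_rsp]
      u_omega
    · rw [w_mem]
      exact Floor.bits_push h.loop _ 8 _ (by u_omega) (by u_omega)
    · rw [bitsArg_def, w_rsi]
      decide
  · -- 0x115462 `jle 115494` taken: `partitions ≤ j`, the loop is done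
    have hge : P ≤ j := by
      rw [f2d_zext8_toInt P (by omega), f2d_part32_toInt j (by omega)] at hbr_115462
      omega
    have hloop' : FloorLoop u₀ g pc_F4 i A5 A s_115462 := by
      refine Floor.same_mem h.loop w_mem w_rip ?_ ?_ (by v_inv)
      · rw [w_kept.get .rsp rfl]
        exact hfr.rsp
      · rw [w_kept.get .rbp rfl]
        exact h.loop.rbp
    refine ReachVia.done (Or.inr (F2.atF4_of_loop h hloop' w_mem (w_kept.get .rbx rfl) (w_kept.get .r13 rfl) ?_))
    rw [← hG, ← hP]
    exact hge
  · -- 0x115471: `get_bits(f, 4)` returned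
    have hjlt : j < P := by
      rw [f2d_zext8_toInt P (by omega), f2d_part32_toInt j (by omega)] at hbr_115462
      omega
    v_after_call w_rsp_11546c w_mem_11546c
    simp only [w_rdi_11546c] at w_same
    have hpost : GetBitsSpecPost (g.Blk A) g.len (s_11546c.reg .rdi).toNat (bitsArg s_11546c) s_11546c s_11546cr := w_post
    have hrdi : (s_11546c.reg .rdi).toNat = g.f := by
      rw [w_rdi_11546c]
      exact hfn
    have harg : bitsArg s_11546c = 4 := by
      rw [bitsArg_def, w_rsi_11546c]
      rfl
    rw [hrdi, harg] at hpost
    have hun0 : ShadowUntouched v.mem s_11546c.mem := by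
      rw [w_mem_11546c]
      v_untouched
    have hun : ShadowUntouched v.mem s_11546cr.mem := Mem.EqOn.trans hun0 hpost.untouched
    have hsame : Mem.SameExcept
        [⟨(v.reg .rsp).toNat - 408, (v.reg .rsp).toNat⟩,
         ⟨(v.reg .rbp).toNat + 48, (v.reg .rbp).toNat + 56⟩, ⟨(v.reg .rbp).toNat + 84, (v.reg .rbp).toNat + 96⟩,
         ⟨(v.reg .rbp).toNat + 136, (v.reg .rbp).toNat + 144⟩, ⟨(v.reg .rbp).toNat + 1484, (v.reg .rbp).toNat + 1749⟩,
         ⟨(v.reg .rbp).toNat + 1752, (v.reg .rbp).toNat + 1784⟩] v.mem s_11546cr.mem := by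
      u_same
    have hws : ∀ w, w ∈ [(⟨(v.reg .rsp).toNat - 408, (v.reg .rsp).toNat⟩ : Span),
         ⟨(v.reg .rbp).toNat + 48, (v.reg .rbp).toNat + 56⟩, ⟨(v.reg .rbp).toNat + 84, (v.reg .rbp).toNat + 96⟩,
         ⟨(v.reg .rbp).toNat + 136, (v.reg .rbp).toNat + 144⟩, ⟨(v.reg .rbp).toNat + 1484, (v.reg .rbp).toNat + 1749⟩,
         ⟨(v.reg .rbp).toNat + 1752, (v.reg .rbp).toNat + 1784⟩] → Floor.Win g (floorAt g v.mem i) 1596 1596 w := by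
      rw [← hG]
      intro w hw
      simp only [List.mem_cons, List.mem_nil_iff, or_false] at hw
      rcases hw with rfl | rfl | rfl | rfl | rfl | rfl <;> unfold Floor.Win <;> simp only [] <;> omega
    have hrsp' : s_11546cr.reg .rsp = addr g.R := by
      rw [← hfr.rsp, w_rsp]
    have hrbp' : s_11546cr.reg .rbp = addr g.f := by
      rw [w_kept .rbp rfl]
      exact h.loop.rbp
    have hloop' : FloorLoop u₀ g Vorbis.L.start_decoder.cut205 i A5 A s_11546cr :=
      Floor.carry (lo := 1596) (hi := 1596) h.loop hlt (Nat.le_refl _) w_rip hrsp' hrbp' w_inv w_eq hsame hws hun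
        hpost.bits.bits
    obtain ⟨eG, ecount, _, etypes⟩ := Floor.fields_same hgeo0 hsame hws (Nat.le_refl _)
    have EB := Floor.elem_below hgeo0 hsame (fun w hw => (hws w hw).winT (i := i)) (Nat.le_refl _) (Nat.le_refl _)
    rw [← hG] at eG EB
    have epart : Floor1.partitions s_11546cr.mem G = Floor1.partitions v.mem G := by
      simp only [vacc, voff]
      exact EB.u8 _ (by omega) (by omega) (by omega)
    have epcl : ∀ q : Nat, q < 32 →
        Floor1.partition_class_list s_11546cr.mem G q = Floor1.partition_class_list v.mem G q := by
      intro q hq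
      simp only [vacc, voff]
      exact EB.u8 _ (by omega) (by omega) (by omega)
    have hrax : (s_11546cr.reg .rax).toNat < 16 := by
      have h2 := hpost.bits.result.2 (by decide)
      omega
    refine ReachVia.done (Or.inl ?_)
    refine
      { loop := hloop'
        lt := by rw [ecount]; exact hlt
        FL3 := by rw [etypes]; exact h.FL3
        rbx := by rw [w_kept .rbx rfl, eG, hG]; exact h.rbx
        r12 := by rw [w_kept .r12 rfl]; exact h.r12
        r13 := by rw [w_kept .r13 rfl]; exact h.r13
        FL4 := by rw [eG, epart, ← hP]; exact hFL4
        j_lt := by rw [eG, epart, ← hP]; exact hjlt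
        mc_lo := h.mc_lo
        mc_hi := h.mc_hi
        pcl := ?_
        rax := hrax }
    rw [eG]
    have hp := h.pcl
    rw [← hG] at hp
    exact hp.of_eq (fun q hq => epcl q (by omega))

/-- **The second half of the round** (0x115471 … 0x115492, 0x115455 – 0x115459): the checked byte store
`partition_class_list[j] = r15b`, `max_class`, `++j`; back at the head of loop 3985 with `j + 1`. -/
theorem f2d_tail (Lay : Layout) (hLay : Lay.hi = 0x1000000) (μ : Microarch) (hμ : UserX.MicroOK μ) (u₀ : State)
    (hcode : HasCodeNat Lay u₀ Vorbis.L.start_decoder.entry Vorbis.Code.code_start_decoder.nat Vorbis.L.start_decoder.size)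
    (hstore1 : Asan.SmallCheck Lay μ Vorbis.WayInv (Vorbis.CodeOK u₀) [.rax, .rdx] 1 Vorbis.L.__asan_store1_noabort.entry)
    (g : Ghost) (i : Nat) (A5 : Arena) (A : Arena × List Obj) (j : Nat) (mc : Int) (v : State)
    (h : MidF2d u₀ g i A5 A j mc v) :
    ReachVia Lay μ WayInv v (fun w => ∃ mc' : Int, InF2L u₀ g i A5 A (j + 1) mc' w) := by
  have hlt : (i : Int) < stb_vorbis.floor_count v.mem g.f := h.lt
  have hgeo := Floor.geo h.loop hlt
  have hgeo0 := hgeo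
  obtain ⟨r8, rlo, rhi, ra, flo, fhi, fstack, farena, flog, fc1, fc64, ilt, gdef, blo, bhi, btext, bstack, bdata, blog⟩ := hgeo
  have hfr := h.loop.frame
  have hspn : (v.reg .rsp).toNat = g.R := by
    rw [hfr.rsp]
    exact toNat_addr _ (by omega)
  obtain ⟨G, hG⟩ : ∃ G : Nat, G = floorAt g v.mem i := ⟨_, rfl⟩
  rw [← hG] at gdef
  have hgwn : (v.reg .rbx).toNat = G := by
    rw [h.rbx, ← hG]
    exact toNat_addr _ (by omega)
  have hr12 : v.reg .r12 = UInt64.ofNat j := h.r12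
  have hr13 : v.reg .r13 = word32 mc := h.r13
  obtain ⟨z, hz, hrax⟩ : ∃ z, z < 16 ∧ v.reg .rax = UInt64.ofNat z := ⟨_, h.rax, (UInt64.ofNat_toNat).symm⟩
  have hFL4 := h.FL4
  have hjlt := h.j_lt
  rw [← hG] at hFL4 hjlt
  have w_rip := hfr.rip
  have w_eq : Mem.EqOn Vorbis.L.textLo Vorbis.L.textHi u₀.mem v.mem := hfr.code
  have hdf : v.flags .df = false := (show abiInv _ from hfr.inv).1
  have hmx : v.mxcsr &&& 0x1F80 = 0x1F80 := (show abiInv _ from hfr.inv).2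
  have hsse := Vorbis.sseOK_of_abiInv hfr.inv
  u_walk hcode [hμ.vendor] until [Vorbis.L.start_decoder.loop18] span [Vorbis.L.textLo, Vorbis.L.textHi] side (v_side)
  case check_11547c =>
    -- 0x11547c: store1 `g->partition_class_list[j]`
    have hJ := f2d_sext_ofNat j (by omega)
    generalize Word.ofBV (BitVec.signExtend 64 (Word.part Width.w32 (UInt64.ofNat j))) = J at *
    have hun : ShadowUntouched v.mem s_11547c.mem := by v_untouched
    have hsite := Floor.site h.loop hlt (1 + j) 1 (by omega) (by simp only [voff]; omega)
    rw [← hG] at hsite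
    exact Vorbis.Spec.check_site hfr.shadow hun hsite (by u_omega)
  case side_code =>
    -- the store misses the text
    have hJ := f2d_sext_ofNat j (by omega)
    generalize Word.ofBV (BitVec.signExtend 64 (Word.part Width.w32 (UInt64.ofNat j))) = J at *
    u_omega
  · -- `jg` 0x11548d taken: the new class is the new maximum
    have hmlo := h.mc_lo
    have hmhi := h.mc_hi
    have hcmp : mc < (z : Int) := by
      rw [Floor.s32_word32 mc (by omega) (by omega), f2d_z_toInt z hz] at hbr_11548d
      exact hbr_11548d
    have hJ := f2d_sext_ofNat j (by omega)
    generalize Word.ofBV (BitVec.signExtend 64 (Word.part Width.w32 (UInt64.ofNat j))) = J at *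
    have hun : ShadowUntouched v.mem s_115459.mem := by v_untouched
    have hs : Mem.SameExcept [⟨g.R - 8, g.R⟩, ⟨G + 1 + j, G + 2 + j⟩] v.mem s_115459.mem := by
      rw [w_mem]
      u_same
    have hws : ∀ w, w ∈ [(⟨g.R - 8, g.R⟩ : Span), ⟨G + 1 + j, G + 2 + j⟩] →
        Floor.Quiet g (floorAt g v.mem i) (1 + j) (2 + j) w := by
      rw [← hG]
      intro w hwm
      simp only [List.mem_cons, List.mem_nil_iff, or_false] at hwm
      rcases hwm with rfl | rfl <;> unfold Floor.Quiet <;> simp only [] <;> omega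
    have hwsW : ∀ w, w ∈ [(⟨g.R - 8, g.R⟩ : Span), ⟨G + 1 + j, G + 2 + j⟩] →
        Floor.Win g (floorAt g v.mem i) (1 + j) (2 + j) w := fun w hwm => (hws w hwm).win
    have hrsp' : s_115459.reg .rsp = addr g.R := by
      rw [w_rsp]
      exact hfr.rsp
    have hrbp' : s_115459.reg .rbp = addr g.f := by
      rw [w_kept.get .rbp rfl]
      exact h.loop.rbp
    have hloop' : FloorLoop u₀ g Vorbis.L.start_decoder.loop18 i A5 A s_115459 :=
      Floor.carry_quiet (lo := 1 + j) (hi := 2 + j) h.loop hlt (by omega) w_rip hrsp' hrbp' (by v_inv) w_eq hs hws hun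
    obtain ⟨eG, ecount, _, etypes⟩ := Floor.fields_same hgeo0 hs hwsW (by omega)
    have EB := Floor.elem_below hgeo0 hs (fun w hwm => (hwsW w hwm).winT (i := i)) (by omega) (by omega)
    rw [← hG] at eG EB
    have epart : Floor1.partitions s_115459.mem G = Floor1.partitions v.mem G := by
      simp only [vacc, voff]
      exact EB.u8 _ (by omega) (by omega) (by omega)
    have eold : ∀ q : Nat, q < j →
        Floor1.partition_class_list s_115459.mem G q = Floor1.partition_class_list v.mem G q := by
      intro q hq
      simp only [vacc, voff]
      exact EB.u8 _ (by omega) (by omega) (by omega)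
    have enew : Floor1.partition_class_list s_115459.mem G j = z := by
      simp only [vacc, voff]
      have ea : addr (G + 1 + j) = v.reg .rbx + J + 1 := (eq_addr _ _ (by u_omega)).symm
      rw [w_mem, ← ea, Mem.u8_writeLE_same, f2d_byte z hz]
      omega
    have e12 : s_115459.reg .r12 = addr (j + 1) := by
      rw [w_r12]
      exact f2d_inc32_ofNat j (by omega)
    have hp := h.pcl
    rw [← hG] at hp
    refine ReachVia.done ⟨(z : Int), ?_⟩
    refine
      { loop := hloop'
        lt := by rw [ecount]; exact hlt
        FL3 := by rw [etypes]; exact h.FL3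
        rbx := by rw [w_kept.get .rbx rfl, eG, hG]; exact h.rbx
        r12 := e12
        r13 := ?_
        FL4 := by rw [eG, epart]; exact hFL4
        j_le := by rw [eG, epart]; omega
        mc_lo := by omega
        mc_hi := by omega
        pcl := ?_ }
    · rw [w_r13]
      exact f2d_z_word z hz
    · rw [eG]
      refine hp.step eold ?_ ?_ ?_
      · rw [enew]
        omega
      · omega
      · rw [enew]
        omega
  · -- `jg` not taken: `max_class` stays
    have hmlo := h.mc_lo
    have hmhi := h.mc_hi
    have hcmp : (z : Int) ≤ mc := by
      rw [Floor.s32_word32 mc (by omega) (by omega), f2d_z_toInt z hz] at hbr_11548d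
      omega
    have hJ := f2d_sext_ofNat j (by omega)
    generalize Word.ofBV (BitVec.signExtend 64 (Word.part Width.w32 (UInt64.ofNat j))) = J at *
    have hun : ShadowUntouched v.mem s_115459.mem := by v_untouched
    have hs : Mem.SameExcept [⟨g.R - 8, g.R⟩, ⟨G + 1 + j, G + 2 + j⟩] v.mem s_115459.mem := by
      rw [w_mem]
      u_same
    have hws : ∀ w, w ∈ [(⟨g.R - 8, g.R⟩ : Span), ⟨G + 1 + j, G + 2 + j⟩] →
        Floor.Quiet g (floorAt g v.mem i) (1 + j) (2 + j) w := by
      rw [← hG]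
      intro w hwm
      simp only [List.mem_cons, List.mem_nil_iff, or_false] at hwm
      rcases hwm with rfl | rfl <;> unfold Floor.Quiet <;> simp only [] <;> omega
    have hwsW : ∀ w, w ∈ [(⟨g.R - 8, g.R⟩ : Span), ⟨G + 1 + j, G + 2 + j⟩] →
        Floor.Win g (floorAt g v.mem i) (1 + j) (2 + j) w := fun w hwm => (hws w hwm).win
    have hrsp' : s_115459.reg .rsp = addr g.R := by
      rw [w_rsp]
      exact hfr.rsp
    have hrbp' : s_115459.reg .rbp = addr g.f := by
      rw [w_kept.get .rbp rfl]
      exact h.loop.rbp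
    have hloop' : FloorLoop u₀ g Vorbis.L.start_decoder.loop18 i A5 A s_115459 :=
      Floor.carry_quiet (lo := 1 + j) (hi := 2 + j) h.loop hlt (by omega) w_rip hrsp' hrbp' (by v_inv) w_eq hs hws hun
    obtain ⟨eG, ecount, _, etypes⟩ := Floor.fields_same hgeo0 hs hwsW (by omega)
    have EB := Floor.elem_below hgeo0 hs (fun w hwm => (hwsW w hwm).winT (i := i)) (by omega) (by omega)
    rw [← hG] at eG EB
    have epart : Floor1.partitions s_115459.mem G = Floor1.partitions v.mem G := by
      simp only [vacc, voff]
      exact EB.u8 _ (by omega) (by omega) (by omega)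
    have eold : ∀ q : Nat, q < j →
        Floor1.partition_class_list s_115459.mem G q = Floor1.partition_class_list v.mem G q := by
      intro q hq
      simp only [vacc, voff]
      exact EB.u8 _ (by omega) (by omega) (by omega)
    have enew : Floor1.partition_class_list s_115459.mem G j = z := by
      simp only [vacc, voff]
      have ea : addr (G + 1 + j) = v.reg .rbx + J + 1 := (eq_addr _ _ (by u_omega)).symm
      rw [w_mem, ← ea, Mem.u8_writeLE_same, f2d_byte z hz]
      omega
    have e12 : s_115459.reg .r12 = addr (j + 1) := by
      rw [w_r12]
      exact f2d_inc32_ofNat j (by omega)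
    have hp := h.pcl
    rw [← hG] at hp
    refine ReachVia.done ⟨mc, ?_⟩
    refine
      { loop := hloop'
        lt := by rw [ecount]; exact hlt
        FL3 := by rw [etypes]; exact h.FL3
        rbx := by rw [w_kept.get .rbx rfl, eG, hG]; exact h.rbx
        r12 := e12
        r13 := ?_
        FL4 := by rw [eG, epart]; exact hFL4
        j_le := by rw [eG, epart]; omega
        mc_lo := by omega
        mc_hi := by omega
        pcl := ?_ }
    · rw [w_r13]
      exact f2d_word32_idem mc
    · rw [eG]
      refine hp.step eold ?_ ?_ ?_
      · rw [enew]
        omega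
      · omega
      · rw [enew]
        omega

end Vorbis.Spec.start_decoder_F2d

theorem Vorbis.Spec.Worked.start_decoder_F2d_ok : Vorbis.Spec.start_decoder_F2d.Statement := by
  intro Lay hLay μ hμ u₀ hcode h_gb hstore1 g i v hat
  obtain ⟨A5, A, j, mc, h⟩ := hat
  have hj31 : j ≤ 31 := Nat.le_trans h.j_le h.FL4
  have hv12 : (v.reg .r12).toNat = j := by
    rw [h.r12]
    exact Vorbis.toNat_addr j (by omega)
  refine (Vorbis.Spec.start_decoder_F2d.f2d_head Lay hLay μ hμ u₀ hcode h_gb g i A5 A j mc v h).trans ?_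
  intro w hw
  rcases hw with hm | h4
  · refine (Vorbis.Spec.start_decoder_F2d.f2d_tail Lay hLay μ hμ u₀ hcode hstore1 g i A5 A j mc w hm).mono ?_
    intro w' hw'
    obtain ⟨mc', h'⟩ := hw'
    have hj' : j + 1 ≤ 31 := Nat.le_trans h'.j_le h'.FL4
    have hw12 : (w'.reg .r12).toNat = j + 1 := by
      rw [h'.r12]
      exact Vorbis.toNat_addr (j + 1) (by omega)
    refine Or.inl ⟨⟨A5, A, j + 1, mc', h'⟩, ?_⟩
    rw [hw12, hv12]
    omega
  · exact ReachVia.done (Or.inr h4)
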